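-- pv_equiv track=rewrite | github.com/michelleliza/if4072-movie-genre-classification | count_vectorizer.py | count_vectorizer
-- ===== SOURCE A (Python) =====
-- def count_vectorizer(all_doc_words):
--     bag_of_words = set()
--     for doc in all_doc_words:
--         for word in doc:
--             bag_of_words.add(word)
--
--     bag_of_words = list(bag_of_words)
--     bag_of_words.sort()
--
--     vectorize_doc = []
--     for doc in all_doc_words:
--         temp_vectorize_doc = []
--         for word in bag_of_words:
--             temp_vectorize_doc.append(doc.count(word))
--         vectorize_doc.append(temp_vectorize_doc)
--
--     return vectorize_doc
-- ===== SOURCE B (Python) =====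
-- def count_vectorizer(all_doc_words):
--     vocabulary = sorted({word for doc in all_doc_words for word in doc})
--     index_of = {word: i for i, word in enumerate(vocabulary)}
--     vectorize_doc = []
--     for doc in all_doc_words:
--         vector = [0] * len(vocabulary)
--         for word in doc:
--             vector[index_of[word]] += 1
--         vectorize_doc.append(vector)
--     return vectorize_doc
-- ===== Notes on version B (the rewrite author's own statement) =====
-- stated objective: faster
-- what changed: Instead of scanning each document once per vocabulary word with doc.count, B builds a word-to-column index and makes a single pass over each document's words, incrementing the matching slot of a preallocated zero vector.
import Mathlib
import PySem

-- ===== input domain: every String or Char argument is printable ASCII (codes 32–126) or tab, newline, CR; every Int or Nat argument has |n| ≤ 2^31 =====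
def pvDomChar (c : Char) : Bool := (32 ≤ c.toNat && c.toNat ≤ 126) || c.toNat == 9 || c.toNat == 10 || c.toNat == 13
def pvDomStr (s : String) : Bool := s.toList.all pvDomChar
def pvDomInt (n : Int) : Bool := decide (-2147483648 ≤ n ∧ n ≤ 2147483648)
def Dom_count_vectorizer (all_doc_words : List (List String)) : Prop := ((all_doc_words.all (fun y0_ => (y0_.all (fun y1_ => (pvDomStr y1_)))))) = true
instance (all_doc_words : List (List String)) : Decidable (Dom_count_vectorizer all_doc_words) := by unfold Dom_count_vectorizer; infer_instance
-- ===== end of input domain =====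

-- B replaces A's per-vocabulary-word doc.count scans by one pass over each document
-- that increments the word's slot (found via an index dict) in a zero vector.

-- ===== PORT A =====
def count_vectorizer (all_doc_words : List (List String)) : List (List Int) :=
  let bag_of_words : PySem.Set String :=
    all_doc_words.foldl (fun s doc => doc.foldl (fun s w => PySem.Set.add s w) s) PySem.Set.empty
  let sorted_bag := PySem.List.sorted bag_of_words (fun x => x) false
  all_doc_words.foldl (fun acc doc =>
    acc ++ [sorted_bag.foldl (fun tv w => tv ++ [(PySem.List.count doc w : Int)]) []]) []

-- ===== PORT B =====
def count_vectorizer_alt (all_doc_words : List (List String)) : List (List Int) :=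
  let vocabulary :=
    PySem.List.sorted (PySem.Set.ofList (all_doc_words.flatMap id)) (fun x => x) false
  let index_of : PySem.Dict String Int :=
    (PySem.List.enumerate vocabulary 0).foldl (fun d p => d.insert p.2 p.1) PySem.Dict.empty
  all_doc_words.foldl (fun res doc =>
    res ++ [doc.foldl (fun vec w =>
        PySem.List.pySetD vec (index_of.getD w 0) (PySem.List.pyGetD vec (index_of.getD w 0) 0 + 1))
      (List.replicate vocabulary.length 0)]) []

-- ===== PRECONDITION & SPEC =====
def Spec_count_vectorizer (all_doc_words : List (List String)) (out : List (List Int)) : Prop := out = count_vectorizer_alt all_doc_words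
instance (all_doc_words : List (List String)) (out : List (List Int)) : Decidable (Spec_count_vectorizer all_doc_words out) := by unfold Spec_count_vectorizer; infer_instance

-- ===== CLAIM (what is proved, stated in full; the proofs are below) =====
def Claim_equal_count_vectorizer : Prop := ∀ (all_doc_words : List (List String)), Dom_count_vectorizer all_doc_words → Spec_count_vectorizer all_doc_words (count_vectorizer all_doc_words)

-- ===== LEMMAS AND PROOFS =====

-- A's nested set-building loop equals set() of the flattened word list.

lemma pv_flat_fold (all : List (List String)) (s : PySem.Set String) :
    all.foldl (fun s doc => doc.foldl (fun s w => PySem.Set.add s w) s) s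
      = (all.flatMap id).foldl (fun s w => PySem.Set.add s w) s := by
  induction all generalizing s with
  | nil => rfl
  | cons d rest ih => simp [List.foldl_append, ih]

lemma pv_bag_eq (all : List (List String)) :
    all.foldl (fun s doc => doc.foldl (fun s w => PySem.Set.add s w) s) PySem.Set.empty
      = PySem.Set.ofList (all.flatMap id) := by
  rw [pv_flat_fold]; rfl

-- The index dict maps the k-th vocabulary word to k (vocabulary nodup).
lemma pv_index_getD (V : List String) (hnd : V.Nodup) (w : String) (hw : w ∈ V) :
    ((PySem.List.enumerate V 0).foldl (fun d p => d.insert p.2 p.1)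
        (PySem.Dict.empty : PySem.Dict String Int)).getD w 0 = (V.idxOf w : Int) := by
  have hk : V.idxOf w < V.length := List.idxOf_lt_length_of_mem hw
  have hVk : V[V.idxOf w] = w := List.getElem_idxOf hk
  have hitems :
      ((PySem.List.enumerate V 0).foldl (fun d p => d.insert p.2 p.1)
          (PySem.Dict.empty : PySem.Dict String Int)).items
        = (PySem.List.enumerate V 0).map (fun p => (p.2, p.1)) := by
    have := PySem.Dict.items_foldl_insert_fresh (l := PySem.List.enumerate V 0)
      (k := fun p => p.2) (v := fun p => p.1) (d := PySem.Dict.empty)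
      (by intro a _; simp [PySem.Dict.contains_empty])
      (by rw [PySem.List.map_snd_enumerate]; exact hnd)
    simpa using this
  have hndk :
      ((PySem.List.enumerate V 0).foldl (fun d p => d.insert p.2 p.1)
          (PySem.Dict.empty : PySem.Dict String Int)).keys.Nodup := by
    exact PySem.Dict.nodup_keys_foldl_insert_key _ _ _ _ (by simp [PySem.Dict.keys_empty])
  have hmem : (w, (V.idxOf w : Int)) ∈
      ((PySem.List.enumerate V 0).foldl (fun d p => d.insert p.2 p.1)
          (PySem.Dict.empty : PySem.Dict String Int)).items := by
    rw [hitems]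
    refine List.mem_map.mpr ⟨((V.idxOf w : Int), w), ?_, rfl⟩
    exact (PySem.List.mem_enumerate_iff _ _ _).mpr ⟨V.idxOf w, hk, by simp [hVk]⟩
  exact PySem.Dict.getD_of_mem_items _ hmem hndk 0

-- The increment loop over a document adds doc.count V[i] to slot i.
lemma pv_loop_inv (V : List String) (hnd : V.Nodup) (doc : List String)
    (hsub : ∀ w ∈ doc, w ∈ V) (vec : List Int) (hl : vec.length = V.length) :
    doc.foldl (fun vec w => vec.set (V.idxOf w) (vec.getD (V.idxOf w) 0 + 1)) vec
      = List.zipWith (fun v u => v + (doc.count u : Int)) vec V := by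
  induction doc generalizing vec with
  | nil =>
    apply List.ext_getElem
    · simp [hl]
    · intro i h1 h2; simp
  | cons w doc ih =>
    have hw : w ∈ V := hsub w (by simp)
    have hk : V.idxOf w < V.length := List.idxOf_lt_length_of_mem hw
    have hVk : V[V.idxOf w] = w := List.getElem_idxOf hk
    have hjv : V.idxOf w < vec.length := by omega
    have hl' : (vec.set (V.idxOf w) (vec.getD (V.idxOf w) 0 + 1)).length = V.length := by
      simpa using hl
    rw [List.foldl_cons, ih (fun u hu => hsub u (by simp [hu])) _ hl']
    apply List.ext_getElem
    · simp [hl]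
    · intro i h1 h2
      have hiV : i < V.length := by simp at h2; omega
      have hivec : i < vec.length := by omega
      have hgetD : vec.getD (V.idxOf w) 0 = vec[V.idxOf w]'hjv := by
        rw [List.getD_eq_getElem?_getD, List.getElem?_eq_getElem hjv]; rfl
      simp only [List.getElem_zipWith]
      by_cases hij : i = V.idxOf w
      · subst hij
        rw [List.getElem_set_self (by simpa using hjv)]
        have hc : (w :: doc).count (V[V.idxOf w]'hk) = doc.count (V[V.idxOf w]'hk) + 1 := by
          simp [hVk]
        simp only [hc, hgetD]; push_cast; ring
      · rw [List.getElem_set_ne (by omega)]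
        have hne : w ≠ V[i]'hiV := by
          intro heq
          exact hij ((List.Nodup.getElem_inj_iff hnd).mp (by rw [hVk, ← heq])).symm
        have hc : (w :: doc).count (V[i]'hiV) = doc.count (V[i]'hiV) := by
          simp [hne]
        rw [hc]

-- ===== VERDICT (by name: the statement is the Claim_ definition above) =====
theorem count_vectorizer_spec : Claim_equal_count_vectorizer := by
  intro all _
  unfold Spec_count_vectorizer count_vectorizer count_vectorizer_alt
  simp only [pv_bag_eq]
  set V : List String := PySem.List.sorted (PySem.Set.ofList (all.flatMap id)) (fun x => x) false with hV
  have hnd : V.Nodup :=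
    ((PySem.List.sorted_perm _ _ _).nodup_iff).mpr (PySem.Set.nodup_ofList _)
  rw [PySem.List.foldl_append_singleton_eq_map, PySem.List.foldl_append_singleton_eq_map]
  apply List.map_congr_left
  intro doc hdoc
  have hsub : ∀ w ∈ doc, w ∈ V := by
    intro w hwd
    rw [hV, PySem.List.mem_sorted, PySem.Set.mem_ofList]
    exact List.mem_flatMap.mpr ⟨doc, hdoc, hwd⟩
  -- A's row is the map of counts
  rw [PySem.List.foldl_append_singleton_eq_map]
  -- B's row: rewrite the step to the idxOf form, then apply the loop invariant
  have hstep : doc.foldl (fun vec w =>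
      PySem.List.pySetD vec
        (((PySem.List.enumerate V 0).foldl (fun d p => d.insert p.2 p.1) PySem.Dict.empty).getD w 0)
        (PySem.List.pyGetD vec
          (((PySem.List.enumerate V 0).foldl (fun d p => d.insert p.2 p.1) PySem.Dict.empty).getD w 0) 0 + 1))
      (List.replicate V.length (0 : Int))
      = doc.foldl (fun vec w => vec.set (V.idxOf w) (vec.getD (V.idxOf w) 0 + 1))
          (List.replicate V.length (0 : Int)) := by
    apply PySem.List.foldl_congr_mem
    intro vec w hwd
    rw [pv_index_getD V hnd w (hsub w hwd)]
    simp [PySem.List.pySetD_natCast, PySem.List.pyGetD_natCast]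
  rw [hstep, pv_loop_inv V hnd doc hsub _ (by simp)]
  apply List.ext_getElem
  · simp
  · intro i h1 h2
    simp
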